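-- pv_equiv track=rewrite | github.com/Lakers2481/kobe81_traderbot | explainability/playbook_generator.py | _parse_claude_response
-- ===== SOURCE A (Python) =====
-- from typing import Any, Dict, List, Optional
--
-- def _parse_claude_response(response: str) -> Dict[str, str]:
--     """Parse Claude response into sections."""
--     sections = {}
--
--     # Simple section parsing
--     current_section = None
--     current_content = []
--
--     for line in response.split("\n"):
--         if line.startswith("## EXECUTIVE SUMMARY"):
--             if current_section:
--                 sections[current_section] = "\n".join(current_content).strip()
--             current_section = "executive_summary"
--             current_content = []
--         elif line.startswith("## FULL PLAYBOOK"):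
--             if current_section:
--                 sections[current_section] = "\n".join(current_content).strip()
--             current_section = "full_playbook"
--             current_content = []
--         elif line.startswith("## RISK SECTION"):
--             if current_section:
--                 sections[current_section] = "\n".join(current_content).strip()
--             current_section = "risk_section"
--             current_content = []
--         elif line.startswith("## CONFIDENCE SECTION"):
--             if current_section:
--                 sections[current_section] = "\n".join(current_content).strip()
--             current_section = "confidence_section"
--             current_content = []
--         elif line.startswith("## CHECKLIST"):
--             if current_section:
--                 sections[current_section] = "\n".join(current_content).strip()
--             current_section = "checklist"
--             current_content = []
--         else:
--             current_content.append(line)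
--
--     if current_section:
--         sections[current_section] = "\n".join(current_content).strip()
--
--     return sections
-- ===== SOURCE B (Python) =====
-- _HEADERS = [
--     ("## EXECUTIVE SUMMARY", "executive_summary"),
--     ("## FULL PLAYBOOK", "full_playbook"),
--     ("## RISK SECTION", "risk_section"),
--     ("## CONFIDENCE SECTION", "confidence_section"),
--     ("## CHECKLIST", "checklist"),
-- ]
--
--
-- def _parse_claude_response(response: str):
--     """Reverse scan: no current-section state — each header, met while walking the
--     lines back-to-front, claims exactly the lines accumulated after it; the dict is
--     built once at the end from the reversed (key, text) pair list."""
--     pairs = []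
--     tail = []  # lines below the current position, in reverse order
--     for line in reversed(response.split("\n")):
--         for h, k in _HEADERS:
--             if line.startswith(h):
--                 pairs.append((k, "\n".join(reversed(tail)).strip()))
--                 tail = []
--                 break
--         else:
--             tail.append(line)
--     return dict(reversed(pairs))
-- ===== Notes on version B (the rewrite author's own statement) =====
-- stated objective: alternative
-- what changed: Replaces A's forward flush-on-boundary scan with current-section/pending-buffer state by a reverse traversal: walking the lines back-to-front, each header line directly claims the lines accumulated after it (no current-section variable at all), and the dict is built in one shot from the reversed pair list.
import Mathlib
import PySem

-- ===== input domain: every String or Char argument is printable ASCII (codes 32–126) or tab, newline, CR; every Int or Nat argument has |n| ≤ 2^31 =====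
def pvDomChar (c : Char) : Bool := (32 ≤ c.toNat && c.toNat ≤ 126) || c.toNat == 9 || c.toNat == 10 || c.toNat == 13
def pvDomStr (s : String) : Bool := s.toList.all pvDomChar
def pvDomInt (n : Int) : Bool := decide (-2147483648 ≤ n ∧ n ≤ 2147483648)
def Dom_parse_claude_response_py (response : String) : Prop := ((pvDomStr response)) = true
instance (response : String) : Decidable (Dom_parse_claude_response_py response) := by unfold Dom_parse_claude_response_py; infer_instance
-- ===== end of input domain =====

-- B replaces A's forward flush-on-boundary scan (current-section + pending-buffer state)
-- by a reverse traversal: each header claims the lines accumulated after it, and the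
-- dict is built once at the end from the reversed pair list (objective: alternative).

-- ===== PORT A =====
-- flush-then-switch loop body, one branch per header, literal transliteration of A
def pvStepA (st : PySem.Dict String String × Option String × List String) (line : String) :
    PySem.Dict String String × Option String × List String :=
  let sections := st.1; let cs := st.2.1; let cc := st.2.2
  let flush : PySem.Dict String String :=
    match cs with
    | some k => sections.insert k (PySem.Str.strip (PySem.Str.join "\n" cc))
    | none => sections
  if PySem.Str.startswith line "## EXECUTIVE SUMMARY" then
    (flush, some "executive_summary", [])
  else if PySem.Str.startswith line "## FULL PLAYBOOK" then
    (flush, some "full_playbook", [])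
  else if PySem.Str.startswith line "## RISK SECTION" then
    (flush, some "risk_section", [])
  else if PySem.Str.startswith line "## CONFIDENCE SECTION" then
    (flush, some "confidence_section", [])
  else if PySem.Str.startswith line "## CHECKLIST" then
    (flush, some "checklist", [])
  else
    (sections, cs, cc ++ [line])

def parse_claude_response_py (response : String) : List (String × String) :=
  -- response.split("\n"): sep is the non-empty literal "\n", so split? is always some
  let lines := (PySem.Str.split? response "\n").getD []
  let st := lines.foldl pvStepA (PySem.Dict.empty, none, [])
  (match st.2.1 with
   | some k => st.1.insert k (PySem.Str.strip (PySem.Str.join "\n" st.2.2))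
   | none => st.1).items

-- ===== PORT B =====
def pvHeaders : List (String × String) :=
  [("## EXECUTIVE SUMMARY", "executive_summary"),
   ("## FULL PLAYBOOK", "full_playbook"),
   ("## RISK SECTION", "risk_section"),
   ("## CONFIDENCE SECTION", "confidence_section"),
   ("## CHECKLIST", "checklist")]

-- B's inner 'for h, k in _HEADERS: if line.startswith(h): … break / else: …'
def pvHeaderKey (line : String) : Option String :=
  (pvHeaders.find? (fun p => PySem.Str.startswith line p.1)).map (·.2)

-- B's reverse-scan loop body: state = (pairs emitted so far, tail lines in reverse order)
def pvStepB (st : List (String × String) × List String) (line : String) :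
    List (String × String) × List String :=
  match pvHeaderKey line with
  | some k => (st.1 ++ [(k, PySem.Str.strip (PySem.Str.join "\n" st.2.reverse))], [])
  | none => (st.1, st.2 ++ [line])

def parse_claude_response_py_alt (response : String) : List (String × String) :=
  let lines := (PySem.Str.split? response "\n").getD []
  let st := lines.reverse.foldl pvStepB ([], [])
  -- dict(reversed(pairs))
  (st.1.reverse.foldl (fun d p => d.insert p.1 p.2) (PySem.Dict.empty : PySem.Dict String String)).items

-- ===== PRECONDITION & SPEC =====
def Spec_parse_claude_response_py (response : String) (out : List (String × String)) : Prop := out = parse_claude_response_py_alt response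
instance (response : String) (out : List (String × String)) : Decidable (Spec_parse_claude_response_py response out) := by unfold Spec_parse_claude_response_py; infer_instance

-- ===== CLAIM (what is proved, stated in full; the proofs are below) =====
def Claim_equal_parse_claude_response_py : Prop := ∀ (response : String), Dom_parse_claude_response_py response → Spec_parse_claude_response_py response (parse_claude_response_py response)

-- ===== LEMMAS AND PROOFS =====

def pvFinStr (cc : List String) : String := PySem.Str.strip (PySem.Str.join "\n" cc)

-- common right-recursive characterization: (pre-first-header lines, section (key, content) list)
def pvCollect : List String → List String × List (String × List String)
  | [] => ([], [])
  | l :: ls =>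
    let r := pvCollect ls
    match pvHeaderKey l with
    | some k => ([], (k, r.1) :: r.2)
    | none => (l :: r.1, r.2)

def pvFlushA (s : PySem.Dict String String) (cs : Option String) (cc : List String) :
    PySem.Dict String String :=
  match cs with
  | some k => s.insert k (pvFinStr cc)
  | none => s

def pvPend (cs : Option String) (cc : List String)
    (r : List String × List (String × List String)) : List (String × List String) :=
  match cs with
  | some k => (k, cc ++ r.1) :: r.2
  | none => r.2

-- A's five-branch body, phrased through the header lookup
theorem pvStepA_eq (s : PySem.Dict String String) (cs : Option String) (cc : List String)
    (line : String) :
    pvStepA (s, cs, cc) line =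
      match pvHeaderKey line with
      | some k => (pvFlushA s cs cc, some k, [])
      | none => (s, cs, cc ++ [line]) := by
  unfold pvStepA pvHeaderKey pvHeaders pvFlushA pvFinStr
  cases h1 : PySem.Str.startswith line "## EXECUTIVE SUMMARY" <;>
  cases h2 : PySem.Str.startswith line "## FULL PLAYBOOK" <;>
  cases h3 : PySem.Str.startswith line "## RISK SECTION" <;>
  cases h4 : PySem.Str.startswith line "## CONFIDENCE SECTION" <;>
  cases h5 : PySem.Str.startswith line "## CHECKLIST" <;>
  simp only [h1, h2, h3, h4, h5, List.find?, Bool.false_eq_true, if_false, if_true,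
    Option.map_some, Option.map_none]

-- A's fold, finalized, equals an insert-fold over the characterization
theorem pvA_char (lines : List String) (s : PySem.Dict String String)
    (cs : Option String) (cc : List String) :
    pvFlushA (lines.foldl pvStepA (s, cs, cc)).1
        (lines.foldl pvStepA (s, cs, cc)).2.1 (lines.foldl pvStepA (s, cs, cc)).2.2
      = (pvPend cs cc (pvCollect lines)).foldl
          (fun d p => d.insert p.1 (pvFinStr p.2)) s := by
  induction lines generalizing s cs cc with
  | nil =>
    cases cs <;> simp [pvFlushA, pvPend, pvCollect, List.foldl]
  | cons l ls ih =>
    simp only [List.foldl_cons, pvStepA_eq]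
    cases hk : pvHeaderKey l with
    | some j =>
      rw [ih]
      cases cs <;> simp [pvPend, pvCollect, hk, pvFlushA, List.foldl]
    | none =>
      rw [ih]
      cases cs <;> simp [pvPend, pvCollect, hk]

-- B's reverse fold computes the reversed finalized pair list and the reversed remainder
theorem pvB_char (lines : List String) :
    lines.foldr (fun x acc => pvStepB acc x) ([], [])
      = (((pvCollect lines).2.map (fun p => (p.1, pvFinStr p.2))).reverse,
         (pvCollect lines).1.reverse) := by
  induction lines with
  | nil => rfl
  | cons l ls ih =>
    rw [List.foldr_cons, ih]
    cases hk : pvHeaderKey l with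
    | some j => simp [pvStepB, hk, pvCollect, pvFinStr]
    | none => simp [pvStepB, hk, pvCollect]

-- ===== VERDICT (by name: the statement is the Claim_ definition above) =====
theorem parse_claude_response_py_spec : Claim_equal_parse_claude_response_py := by
  intro response _
  unfold Spec_parse_claude_response_py parse_claude_response_py parse_claude_response_py_alt
  dsimp only
  generalize (PySem.Str.split? response "\n").getD [] = lines
  have hB : lines.reverse.foldl pvStepB ([], [])
      = (((pvCollect lines).2.map (fun p => (p.1, pvFinStr p.2))).reverse,
         (pvCollect lines).1.reverse) := by
    rw [List.foldl_reverse]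
    exact pvB_char lines
  have hA := pvA_char lines PySem.Dict.empty none []
  simp only [pvPend] at hA
  simp only [hB, List.reverse_reverse, List.foldl_map]
  rw [← hA]
  cases h : (lines.foldl pvStepA (PySem.Dict.empty, none, [])).2.1 <;>
    simp [pvFlushA, pvFinStr]
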